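-- pv_equiv track=rewrite | github.com/image-multithresholding/Image-multithresholding | PythonCodes/bibliotecaFunciones.py | gray_clustering
-- ===== SOURCE A (Python) =====
-- from typing import List, Dict, Tuple
--
-- def gray_clustering(levels: int, breakPositions: List[int], levelsOffset: int = 0) -> List[List[int]]:
--     clusters = [[]]
--
--     # Iterate over every level.
--     for x in range(levelsOffset, levelsOffset + levels):
--         # If we have to break at this level, start a new list.
--         if x in breakPositions:
--             clusters.append([x])
--         # If not, just add this level to the last created cluster.
--         else:
--             clusters[-1].append(x)
--
--     return clusters
-- ===== SOURCE B (Python) =====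
-- def gray_clustering(levels, breakPositions, levelsOffset=0):
--     # Backward sweep: collect each cluster right-to-left, cutting when the
--     # break level itself is reached, then reverse; set lookup instead of a
--     # list scan per level.
--     bset = set(breakPositions)
--     out = []
--     cur = []
--     for x in reversed(range(levelsOffset, levelsOffset + levels)):
--         cur.append(x)
--         if x in bset:
--             cur.reverse()
--             out.append(cur)
--             cur = []
--     cur.reverse()
--     out.append(cur)
--     out.reverse()
--     return out
-- ===== Notes on version B (the rewrite author's own statement) =====
-- stated objective: alternative
-- what changed: A sweeps the levels forward appending each level into the last cluster (with a linear 'x in breakPositions' list scan per level); B sweeps the levels backward, accumulating each cluster right-to-left and cutting exactly when the break level itself is reached, with a precomputed set for the membership test.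
import Mathlib
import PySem

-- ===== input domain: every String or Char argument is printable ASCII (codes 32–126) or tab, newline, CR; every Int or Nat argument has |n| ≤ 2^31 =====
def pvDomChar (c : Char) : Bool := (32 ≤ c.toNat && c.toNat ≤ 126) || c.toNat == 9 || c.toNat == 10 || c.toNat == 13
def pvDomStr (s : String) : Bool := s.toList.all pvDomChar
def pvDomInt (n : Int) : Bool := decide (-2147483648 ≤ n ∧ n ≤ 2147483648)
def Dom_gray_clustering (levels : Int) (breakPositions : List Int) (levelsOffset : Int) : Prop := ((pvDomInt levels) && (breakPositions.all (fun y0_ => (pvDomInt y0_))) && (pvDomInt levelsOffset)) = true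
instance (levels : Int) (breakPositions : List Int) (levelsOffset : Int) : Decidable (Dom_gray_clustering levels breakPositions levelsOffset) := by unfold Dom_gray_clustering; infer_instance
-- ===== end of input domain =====

-- B replaces A's forward append-into-last-cluster loop by a backward sweep that
-- cuts a cluster when its break level is reached (alternative decomposition; set
-- membership instead of a list scan per level).

-- ===== PORT A =====
-- clusters[-1].append(x): append x to the last cluster (in-place in Python)
def pvAppendLast : List (List Int) → Int → List (List Int)
  | [], _ => []
  | [c], x => [c ++ [x]]
  | c :: c' :: cs, x => c :: pvAppendLast (c' :: cs) x

def gray_clustering (levels : Int) (breakPositions : List Int) (levelsOffset : Int) : List (List Int) :=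
  (PySem.List.pyRange levelsOffset (levelsOffset + levels) 1).foldl
    (fun clusters x =>
      if x ∈ breakPositions then clusters ++ [[x]]
      else pvAppendLast clusters x)
    [[]]

-- ===== PORT B =====
def gray_clustering_alt (levels : Int) (breakPositions : List Int) (levelsOffset : Int) : List (List Int) :=
  let bset : PySem.Set Int := PySem.Set.ofList breakPositions
  let r :=
    ((PySem.List.pyRange levelsOffset (levelsOffset + levels) 1).reverse).foldl
      (fun (s : List (List Int) × List Int) x =>
        let cur := s.2 ++ [x]
        if x ∈ bset then (s.1 ++ [cur.reverse], []) else (s.1, cur))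
      ([], [])
  (r.1 ++ [r.2.reverse]).reverse

-- ===== PRECONDITION & SPEC =====
def Spec_gray_clustering (levels : Int) (breakPositions : List Int) (levelsOffset : Int) (out : List (List Int)) : Prop := out = gray_clustering_alt levels breakPositions levelsOffset
instance (levels : Int) (breakPositions : List Int) (levelsOffset : Int) (out : List (List Int)) : Decidable (Spec_gray_clustering levels breakPositions levelsOffset out) := by unfold Spec_gray_clustering; infer_instance

-- ===== CLAIM (what is proved, stated in full; the proofs are below) =====
def Claim_equal_gray_clustering : Prop := ∀ (levels : Int) (breakPositions : List Int) (levelsOffset : Int), Dom_gray_clustering levels breakPositions levelsOffset → Spec_gray_clustering levels breakPositions levelsOffset (gray_clustering levels breakPositions levelsOffset)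

-- ===== LEMMAS AND PROOFS =====

-- Common characterisation: head cluster and remaining clusters of xs split at bp.
def pvSplit (bp : List Int) : List Int → List Int × List (List Int)
  | [] => ([], [])
  | x :: xs =>
    let p := pvSplit bp xs
    if x ∈ bp then ([], (x :: p.1) :: p.2) else (x :: p.1, p.2)

def pvAppendMany : List (List Int) → List Int → List (List Int)
  | [], _ => []
  | [c], h => [c ++ h]
  | c :: c' :: cs, h => c :: pvAppendMany (c' :: cs) h

theorem pvAppendMany_nil (acc : List (List Int)) : pvAppendMany acc [] = acc := by
  induction acc with
  | nil => rfl
  | cons c cs ih =>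
    cases cs with
    | nil => simp [pvAppendMany]
    | cons c' cs' => simpa [pvAppendMany] using ih

theorem pvAppendLast_eq (acc : List (List Int)) (x : Int) :
    pvAppendLast acc x = pvAppendMany acc [x] := by
  induction acc with
  | nil => rfl
  | cons c cs ih =>
    cases cs with
    | nil => rfl
    | cons c' cs' => simpa [pvAppendLast, pvAppendMany] using ih

theorem pvAppendMany_ne_nil (c : List Int) (cs : List (List Int)) (h : List Int) :
    pvAppendMany (c :: cs) h ≠ [] := by
  cases cs <;> simp [pvAppendMany]

theorem pvAppendMany_cons (c : List Int) {l : List (List Int)} (hl : l ≠ []) (h : List Int) :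
    pvAppendMany (c :: l) h = c :: pvAppendMany l h := by
  cases l with
  | nil => exact absurd rfl hl
  | cons a as => rfl

theorem pvAppendMany_append (acc : List (List Int)) (h h' : List Int) :
    pvAppendMany (pvAppendMany acc h) h' = pvAppendMany acc (h ++ h') := by
  induction acc with
  | nil => rfl
  | cons c cs ih =>
    cases cs with
    | nil => simp [pvAppendMany]
    | cons c' cs' =>
      rw [pvAppendMany_cons c (by simp : (c' :: cs' : List (List Int)) ≠ []) h,
        pvAppendMany_cons c (pvAppendMany_ne_nil c' cs' h) h',
        pvAppendMany_cons c (by simp : (c' :: cs' : List (List Int)) ≠ []) (h ++ h'), ih]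

theorem pvAppendMany_snoc (acc : List (List Int)) (c h : List Int) :
    pvAppendMany (acc ++ [c]) h = acc ++ [c ++ h] := by
  induction acc with
  | nil => rfl
  | cons a as ih =>
    cases as with
    | nil => simp [pvAppendMany]
    | cons a' as' => simpa [pvAppendMany] using ih

-- A's loop computes pvSplit, glued onto the accumulator.
theorem foldl_A_eq (bp : List Int) (xs : List Int) :
    ∀ acc : List (List Int),
      xs.foldl (fun clusters x =>
          if x ∈ bp then clusters ++ [[x]] else pvAppendLast clusters x) acc
        = pvAppendMany acc (pvSplit bp xs).1 ++ (pvSplit bp xs).2 := by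
  induction xs with
  | nil => intro acc; simp [pvSplit, pvAppendMany_nil]
  | cons x xs ih =>
    intro acc
    simp only [List.foldl_cons]
    rw [ih]
    by_cases hx : x ∈ bp
    · rw [if_pos hx]
      simp [pvSplit, hx, pvAppendMany_snoc, pvAppendMany_nil]
    · rw [if_neg hx, pvAppendLast_eq, pvAppendMany_append]
      simp [pvSplit, hx]

-- B's backward sweep computes pvSplit with both components reversed.
theorem foldr_B_eq (bp : List Int) (xs : List Int) :
    xs.foldr (fun x (s : List (List Int) × List Int) =>
        let cur := s.2 ++ [x]
        if x ∈ PySem.Set.ofList bp then (s.1 ++ [cur.reverse], []) else (s.1, cur))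
      ([], [])
      = ((pvSplit bp xs).2.reverse, (pvSplit bp xs).1.reverse) := by
  induction xs with
  | nil => rfl
  | cons x xs ih =>
    simp only [List.foldr_cons]
    rw [ih]
    by_cases hx : x ∈ bp
    · simp [pvSplit, hx, PySem.Set.mem_ofList]
    · simp [pvSplit, hx, PySem.Set.mem_ofList]

theorem gray_clustering_eq_split (levels : Int) (bp : List Int) (off : Int) :
    gray_clustering levels bp off
      = (pvSplit bp (PySem.List.pyRange off (off + levels) 1)).1
        :: (pvSplit bp (PySem.List.pyRange off (off + levels) 1)).2 := by
  unfold gray_clustering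
  rw [foldl_A_eq]
  simp [pvAppendMany]

theorem gray_clustering_alt_eq_split (levels : Int) (bp : List Int) (off : Int) :
    gray_clustering_alt levels bp off
      = (pvSplit bp (PySem.List.pyRange off (off + levels) 1)).1
        :: (pvSplit bp (PySem.List.pyRange off (off + levels) 1)).2 := by
  simp only [gray_clustering_alt]
  rw [List.foldl_reverse]
  rw [foldr_B_eq]
  simp

-- ===== VERDICT (by name: the statement is the Claim_ definition above) =====
theorem gray_clustering_spec : Claim_equal_gray_clustering := by
  intro levels bp off _
  unfold Spec_gray_clustering
  rw [gray_clustering_eq_split, gray_clustering_alt_eq_split]
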